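-- pv_equiv track=rewrite | github.com/google-deepmind/simply | simply/utils/module.py | create_char_dict
-- ===== SOURCE A (Python) =====
-- from collections.abc import Sequence
-- from typing import Any, cast, ClassVar, final
--
-- def create_char_dict(term: str, seq: Sequence[Any] | None) -> dict[str, Any]:
--   """Creates a dictionary mapping dimension characters to sequence elements.
--
--   This function maps characters in an einsum term (e.g., 'b...hd') to
--   elements in a sequence (e.g., shape or partition specs). It correctly
--   handles ellipsis (...) but assumes that at most one (...) is present.
--
--   Args:
--     term: Einsum term string, e.g., 'b...hd'.
--     seq: A sequence (e.g., shape tuple) of values to map to characters in term.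
--       If None, all characters are mapped to None.
--
--   Returns:
--     A dictionary mapping characters in term to elements in seq.
--   """
--   # If seq is None, then assume all dimensions should corresponds to None.
--   if seq is None:
--     return {c: None for c in term.replace('...', '')}
--   if '...' not in term:
--     return {c: seq[i] for i, c in enumerate(term)}
--   assert term.count('...') == 1, 'Term must contain zero or exactly one `...`.'
--   str_before_ellipsis, str_after_ellipsis = term.split('...')
--   assert len(seq) >= len(str_before_ellipsis) + len(str_after_ellipsis), (
--       f'Sequence {seq} is too short for term {term}.')
--   char_dict = {}
--   n_chars_before_ellipsis = len(str_before_ellipsis)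
--   n_chars_after_ellipsis = len(str_after_ellipsis)
--   for i in range(n_chars_before_ellipsis):
--     char = str_before_ellipsis[i]
--     char_dict[char] = seq[i]
--   n = len(seq)
--   for i in range(n_chars_after_ellipsis):
--     char = str_after_ellipsis[i]
--     char_dict[char] = seq[n-n_chars_after_ellipsis+i]
--   return char_dict
-- ===== SOURCE B (Python) =====
-- def create_char_dict(term, seq):
--   """Single-pass rewrite: align term chars (None for ellipsis slots) with seq and zip once."""
--   if seq is None:
--     return dict.fromkeys(term.replace('...', ''))
--   if '...' in term:
--     assert term.count('...') == 1, 'Term must contain zero or exactly one `...`.'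
--     before, after = term.split('...')
--     assert len(seq) >= len(before) + len(after), (
--         f'Sequence {seq} is too short for term {term}.')
--     aligned = list(before) + [None] * (len(seq) - len(before) - len(after)) + list(after)
--   else:
--     aligned = list(term)
--   return {c: v for c, v in zip(aligned, seq) if c is not None}
-- ===== Notes on version B (the rewrite author's own statement) =====
-- stated objective: simpler
-- what changed: The two offset-index loops over the split halves are replaced by building one ellipsis-aligned key list (before + None padding + after) and zipping it once with seq; the seq-is-None branch becomes dict.fromkeys.
import Mathlib
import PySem

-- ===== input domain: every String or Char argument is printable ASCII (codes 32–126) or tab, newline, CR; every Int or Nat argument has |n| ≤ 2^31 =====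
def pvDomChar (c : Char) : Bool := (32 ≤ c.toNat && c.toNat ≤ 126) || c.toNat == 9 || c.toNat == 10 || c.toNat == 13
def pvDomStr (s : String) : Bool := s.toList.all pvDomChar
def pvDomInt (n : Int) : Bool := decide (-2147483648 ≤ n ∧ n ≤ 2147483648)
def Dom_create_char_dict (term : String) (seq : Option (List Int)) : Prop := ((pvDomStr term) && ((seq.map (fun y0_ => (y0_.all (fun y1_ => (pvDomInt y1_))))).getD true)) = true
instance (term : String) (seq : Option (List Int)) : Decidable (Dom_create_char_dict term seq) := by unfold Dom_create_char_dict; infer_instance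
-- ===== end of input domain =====

-- B replaces A's two index-offset loops by one zip of seq with an ellipsis-aligned char list (objective: simpler decomposition, not faster).

-- ===== PORT A =====
def create_char_dict (term : String) (seq : Option (List Int)) : List (String × Option Int) :=
  match seq with
  | none =>
      -- {c: None for c in term.replace('...', '')}
      ((PySem.Str.replace term "..." "").toList.foldl
        (fun d c => d.insert (String.ofList [c]) (none : Option Int)) PySem.Dict.empty).items
  | some s =>
      if !(PySem.Str.isIn "..." term) then
        -- {c: seq[i] for i, c in enumerate(term)}
        ((PySem.List.enumerate term.toList 0).foldl
          (fun d p => d.insert (String.ofList [p.2]) (PySem.List.pyGet? s p.1)) PySem.Dict.empty).items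
      else
        -- assert term.count('...') == 1  (Pre_); term.split('...')
        let parts := PySem.Chars.splitOn term.toList "...".toList
        let str_before := parts.getD 0 []
        let str_after := parts.getD 1 []
        -- assert len(seq) >= len(str_before) + len(str_after)  (Pre_)
        let d1 := (PySem.List.pyRange 0 (str_before.length : Int) 1).foldl
          (fun d i => d.insert (String.ofList [PySem.List.pyGetD str_before i ' '])
            (PySem.List.pyGet? s i)) PySem.Dict.empty
        let n : Int := (s.length : Int)
        let d2 := (PySem.List.pyRange 0 (str_after.length : Int) 1).foldl
          (fun d i => d.insert (String.ofList [PySem.List.pyGetD str_after i ' '])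
            (PySem.List.pyGet? s (n - (str_after.length : Int) + i))) d1
        d2.items

-- ===== PORT B =====
-- the comprehension's body: {c: v for c, v in zip(aligned, seq) if c is not None}
def pvStepB (d : PySem.Dict String (Option Int)) (cv : Option Char × Int) : PySem.Dict String (Option Int) :=
  match cv.1 with
  | some c => d.insert (String.ofList [c]) (some cv.2)
  | none => d

def create_char_dict_alt (term : String) (seq : Option (List Int)) : List (String × Option Int) :=
  match seq with
  | none =>
      -- dict.fromkeys(term.replace('...', ''))
      (PySem.List.dedup (PySem.Str.replace term "..." "").toList).map
        (fun c => (String.ofList [c], (none : Option Int)))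
  | some s =>
      let aligned : List (Option Char) :=
        if PySem.Str.isIn "..." term then
          let parts := PySem.Chars.splitOn term.toList "...".toList
          let before := parts.getD 0 []
          let after := parts.getD 1 []
          before.map some ++ List.replicate (s.length - before.length - after.length) none
            ++ after.map some
        else term.toList.map some
      ((aligned.zip s).foldl pvStepB PySem.Dict.empty).items

-- ===== PRECONDITION & SPEC =====
-- Pre_ excludes exactly the inputs on which the Python A raises: AssertionError when term
-- contains two or more '...', and AssertionError / IndexError when seq is too short.
def pvPreB (term : String) (seq : Option (List Int)) : Bool :=
  match seq with
  | none => true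
  | some s =>
      if PySem.Str.isIn "..." term then
        PySem.Str.count term "..." == 1 &&
        ((PySem.Chars.splitOn term.toList "...".toList).getD 0 []).length
          + ((PySem.Chars.splitOn term.toList "...".toList).getD 1 []).length ≤ s.length
      else term.toList.length ≤ s.length

def Pre_create_char_dict (term : String) (seq : Option (List Int)) : Prop :=
  pvPreB term seq = true
instance (term : String) (seq : Option (List Int)) : Decidable (Pre_create_char_dict term seq) := by
  unfold Pre_create_char_dict; infer_instance

def pvWitness_create_char_dict : String × Option (List Int) := ("b...hd", some [2, 3, 4, 5, 6])

def Spec_create_char_dict (term : String) (seq : Option (List Int)) (out : List (String × Option Int)) : Prop := out = create_char_dict_alt term seq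
instance (term : String) (seq : Option (List Int)) (out : List (String × Option Int)) : Decidable (Spec_create_char_dict term seq out) := by unfold Spec_create_char_dict; infer_instance

-- ===== CLAIM (what is proved, stated in full; the proofs are below) =====
def Claim_equal_create_char_dict : Prop := ∀ (term : String) (seq : Option (List Int)), Dom_create_char_dict term seq → Pre_create_char_dict term seq → Spec_create_char_dict term seq (create_char_dict term seq)

-- ===== LEMMAS AND PROOFS =====

-- seq = None branch: every value stored by A's insert-none loop is none.
theorem pv_getD_foldl_none (cs : List Char) :
    ∀ (d : PySem.Dict String (Option Int)), (∀ k, d.getD k none = none) → ∀ k,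
      (cs.foldl (fun d c => d.insert (String.ofList [c]) (none : Option Int)) d).getD k none = none := by
  induction cs with
  | nil => intro d hd k; exact hd k
  | cons c cs ih =>
      intro d hd k
      refine ih _ (fun k' => ?_) k
      rw [PySem.Dict.getD_insert]
      split_ifs with h
      · rfl
      · exact hd k'

-- Set.ofList commutes with an injective map.
theorem pv_ofList_map (f : Char → String) (hf : Function.Injective f) (cs : List Char) :
    PySem.Set.ofList (cs.map f) = (PySem.Set.ofList cs).map f := by
  induction cs using List.reverseRecOn with
  | nil => rfl
  | append_singleton cs c ih =>
      rw [List.map_append, List.map_singleton, PySem.Set.ofList_append_singleton,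
        PySem.Set.ofList_append_singleton, ih, PySem.Set.add_eq_ite, PySem.Set.add_eq_ite]
      by_cases h : c ∈ PySem.Set.ofList cs
      · rw [if_pos h, if_pos (List.mem_map_of_mem h)]
      · rw [if_neg h, if_neg (fun hm => h ((List.mem_map_of_injective hf).mp hm)),
          List.map_append, List.map_singleton]

theorem pv_key_inj : Function.Injective (fun c => String.ofList [c]) := by
  intro a b hab
  have := congrArg String.toList hab
  simpa using this

-- A's insert-none loop from the empty dict has exactly the deduped keys, all mapped to none.
theorem pv_none_branch (cs : List Char) :
    ((cs.foldl (fun d c => d.insert (String.ofList [c]) (none : Option Int)) PySem.Dict.empty).items)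
      = (PySem.List.dedup cs).map (fun c => (String.ofList [c], (none : Option Int))) := by
  have hkeys : (cs.foldl (fun d c => d.insert (String.ofList [c]) (none : Option Int)) PySem.Dict.empty).keys
      = PySem.Set.ofList (cs.map (fun c => String.ofList [c])) := by
    rw [PySem.Dict.keys_foldl_insert_key cs (fun c => String.ofList [c]) (fun _ _ => none) PySem.Dict.empty,
      PySem.Dict.keys_empty, PySem.Set.update_nil_left]
  have hnd : (cs.foldl (fun d c => d.insert (String.ofList [c]) (none : Option Int)) PySem.Dict.empty).keys.Nodup := by
    rw [hkeys]; exact PySem.Set.nodup_ofList _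
  rw [PySem.Dict.items_eq_map_keys _ hnd none, hkeys, pv_ofList_map _ pv_key_inj,
    ← PySem.List.dedup_eq_ofList, List.map_map]
  refine List.map_congr_left (fun k hk => ?_)
  simp only [Function.comp_apply]
  rw [pv_getD_foldl_none cs PySem.Dict.empty (fun k => by simp [PySem.Dict.getD_empty]) _]

-- zip against a replicate-none block inserts nothing.
theorem pv_fold_replicate_none (m : Nat) :
    ∀ (ys : List Int) (d : PySem.Dict String (Option Int)),
      (((List.replicate m (none : Option Char)).zip ys).foldl pvStepB d) = d := by
  induction m with
  | zero => intro ys d; rfl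
  | succ m ih =>
      intro ys d
      cases ys with
      | nil => rfl
      | cons y ys => simpa [pvStepB] using ih ys d

-- zip only reads the first l.length elements of the right list.
theorem pv_zip_take {α β : Type} (l : List α) (s : List β) : l.zip s = l.zip (s.take l.length) := by
  induction l generalizing s with
  | nil => simp
  | cons x l ih => cases s with
    | nil => simp
    | cons y s =>
        simp only [List.zip_cons_cons, List.length_cons, List.take_succ_cons]
        rw [← ih]

-- the central loop shape: an enumerate loop reading seq at (c + i) IS the zip fold over seq.drop c.
theorem pv_enum_zip (cs : List Char) :
    ∀ (s : List Int) (k c : Nat) (d : PySem.Dict String (Option Int)),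
      c + k + cs.length ≤ s.length →
      (PySem.List.enumerate cs (k : Int)).foldl
          (fun d p => d.insert (String.ofList [p.2]) (PySem.List.pyGet? s ((c : Int) + p.1))) d
        = ((cs.map some).zip (s.drop (c + k))).foldl pvStepB d := by
  induction cs with
  | nil => intro s k c d h; simp [PySem.List.enumerate_nil]
  | cons ch cs ih =>
      intro s k c d h
      simp only [List.length_cons] at h
      have hlt : c + k < s.length := by omega
      rw [PySem.List.enumerate_cons, List.foldl_cons,
        List.drop_eq_getElem_cons hlt, List.map_cons, List.zip_cons_cons, List.foldl_cons]
      have hv : PySem.List.pyGet? s ((c : Int) + (k : Int)) = some s[c + k] := by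
        rw [show ((c : Int) + (k : Int)) = ((c + k : Nat) : Int) by push_cast; ring,
          PySem.List.pyGet?_natCast, List.getElem?_eq_getElem hlt]
      have hstep : pvStepB d (some ch, s[c + k]) = d.insert (String.ofList [ch]) (some s[c + k]) := rfl
      rw [hv, hstep]
      have := ih s (k + 1) c (d.insert (String.ofList [ch]) (some s[c + k])) (by omega)
      rw [show ((k : Int) + 1) = ((k + 1 : Nat) : Int) by push_cast; ring, this,
        show c + (k + 1) = c + k + 1 by omega]

-- the same loop shape in A's pyRange form.
theorem pv_range_zip (cs : List Char) (s : List Int) (c : Nat) (d : PySem.Dict String (Option Int))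
    (h : c + cs.length ≤ s.length) :
    (PySem.List.pyRange 0 (cs.length : Int) 1).foldl
        (fun d i => d.insert (String.ofList [PySem.List.pyGetD cs i ' '])
          (PySem.List.pyGet? s ((c : Int) + i))) d
      = ((cs.map some).zip (s.drop c)).foldl pvStepB d := by
  have e := pv_enum_zip cs s 0 c d (by omega)
  rw [Nat.cast_zero, Nat.add_zero] at e
  rw [← e, PySem.List.enumerate_eq_map_pyRange cs ' ', List.foldl_map]
  simp [PySem.List.len_eq]

-- ===== VERDICT (by name: the statement is the Claim_ definition above) =====
theorem create_char_dict_spec : Claim_equal_create_char_dict := by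
  intro term seq hdom hpre
  unfold Spec_create_char_dict
  cases seq with
  | none =>
      simp only [create_char_dict, create_char_dict_alt]
      exact pv_none_branch _
  | some s =>
      by_cases hin : PySem.Str.isIn "..." term = true
      · -- ellipsis branch
        unfold Pre_create_char_dict pvPreB at hpre
        simp only [hin, if_true, Bool.and_eq_true, decide_eq_true_eq] at hpre
        obtain ⟨-, hlen⟩ := hpre
        simp only [create_char_dict, create_char_dict_alt, hin, Bool.not_true, if_pos,
          Bool.false_eq_true, if_false]
        set b := (PySem.Chars.splitOn term.toList "...".toList).getD 0 [] with hbdef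
        set a := (PySem.Chars.splitOn term.toList "...".toList).getD 1 [] with hadef
        set m := s.length - b.length - a.length with hmdef
        have hb : b.length ≤ s.length := by omega
        have ha : a.length ≤ s.length := by omega
        -- A's first loop
        have e1 := pv_range_zip b s 0 PySem.Dict.empty (by omega)
        simp only [Nat.cast_zero, zero_add, List.drop_zero] at e1
        rw [e1]
        -- A's second loop
        simp only [show ((s.length : Int) - (a.length : Int)) = ((s.length - a.length : Nat) : Int)
          from (Nat.cast_sub ha).symm]
        rw [pv_range_zip a s (s.length - a.length) _ (by omega)]
        -- B's zip decomposed into the three segments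
        have hs : s = s.take b.length ++ ((s.drop b.length).take m ++ s.drop (b.length + m)) := by
          rw [← List.drop_drop, List.take_append_drop, List.take_append_drop]
        have hzip : ((b.map some ++ List.replicate m (none : Option Char) ++ a.map some).zip s)
            = (b.map some).zip (s.take b.length)
              ++ (List.replicate m (none : Option Char)).zip ((s.drop b.length).take m)
              ++ (a.map some).zip (s.drop (b.length + m)) := by
          conv_lhs => rw [hs, List.append_assoc]
          rw [List.zip_append (by simp [List.length_take, Nat.min_eq_left hb]),
            List.zip_append (by simp [List.length_take, List.length_drop]; omega),
            ← List.append_assoc]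
        rw [hzip, List.foldl_append, List.foldl_append, pv_fold_replicate_none]
        rw [pv_zip_take (b.map some) s, List.length_map]
        rw [show b.length + m = s.length - a.length by omega]
      · -- no-ellipsis branch
        have hinf : PySem.Str.isIn "..." term = false := by
          simpa using hin
        unfold Pre_create_char_dict pvPreB at hpre
        simp only [hinf, Bool.false_eq_true, if_false, decide_eq_true_eq] at hpre
        simp only [create_char_dict, create_char_dict_alt, hinf, Bool.not_false, if_true,
          Bool.false_eq_true, if_false]
        have e := pv_enum_zip term.toList s 0 0 PySem.Dict.empty (by omega)
        simp only [Nat.cast_zero, zero_add, List.drop_zero] at e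
        rw [e]
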